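-- pv_equiv track=rewrite | github.com/jsheng0901/leetcode | OA/Amazon/fruit_crush.py | getMinimumFruits
-- ===== SOURCE A (Python) =====
-- from typing import List
-- from collections import Counter
-- import heapq
--
-- def getMinimumFruits(fruits: List[int]) -> int:
--     """
--     Time O(n * log(n))
--     Space O(n)
--     计算频率，按照频率的大小从大到小进入大顶堆，每次弹出堆顶的两个元素，同时消除一对，更新频率，如果不等于0，重新插入回去大顶堆，
--     直到弹出所有，或者还有一个剩下，返回的是剩下的这个水果的频率不是剩下的个数。一定最终剩下个水果个数是1或者0。
--     """
--     # 计算水果出现的频率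
--     freq = Counter(fruits)
--     pq = []
--     # 进入大顶堆
--     for val in freq.values():
--         heapq.heappush(pq, -val)
--
--     while len(pq) > 1:
--         # 前两个的频率，记得取负数
--         front1 = -heapq.heappop(pq)
--         front2 = -heapq.heappop(pq)
--         # 更新频率
--         new_freq_front1 = front1 - 1
--         new_freq_front2 = front2 - 1
--
--         # 如果还有水果，则继续加入回去
--         if new_freq_front1 != 0:
--             heapq.heappush(pq, -new_freq_front1)
--         # 同上
--         if new_freq_front2 != 0:
--             heapq.heappush(pq, -new_freq_front2)
--
--     # 返回结果，记得是频率不是个数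
--     return -pq[0] if len(pq) == 1 else 0
-- ===== SOURCE B (Python) =====
-- from typing import List
-- from collections import Counter
--
--
-- def getMinimumFruits(fruits: List[int]) -> int:
--     # Closed form instead of heap simulation: pairing off the two most frequent
--     # fruits leaves 2*m - total if the max frequency m dominates the rest,
--     # otherwise total % 2.
--     if not fruits:
--         return 0
--     m = max(Counter(fruits).values())
--     total = len(fruits)
--     return 2 * m - total if 2 * m > total else total % 2
-- ===== Notes on version B (the rewrite author's own statement) =====
-- stated objective: faster
-- what changed: Replaces the repeated pop-two-maxima heap simulation with the closed form max(2*maxfreq - total, total % 2) computed from a single Counter pass.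
import Mathlib
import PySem

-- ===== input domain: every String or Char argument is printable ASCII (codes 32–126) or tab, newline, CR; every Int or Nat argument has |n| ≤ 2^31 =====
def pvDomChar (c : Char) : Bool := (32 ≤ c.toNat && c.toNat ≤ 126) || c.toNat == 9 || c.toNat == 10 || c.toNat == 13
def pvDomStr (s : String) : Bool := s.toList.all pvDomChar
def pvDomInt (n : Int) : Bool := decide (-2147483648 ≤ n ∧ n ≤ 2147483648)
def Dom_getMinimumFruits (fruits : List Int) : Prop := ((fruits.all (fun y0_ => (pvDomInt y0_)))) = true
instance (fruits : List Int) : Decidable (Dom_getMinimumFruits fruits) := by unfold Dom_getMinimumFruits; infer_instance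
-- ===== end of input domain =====

-- B replaces A's repeated pop-two-maxima heap loop by the closed form
-- max(2*maxfreq - total, total % 2) computed from one Counter pass (objective: faster).

-- ===== PORT A =====
-- A's max-heap of NEGATED counts is modelled exactly as a descending-sorted list of the
-- (positive) counts: heappush = ordered insert, the two heappops = taking the two head
-- elements.  Only the multiset of priorities determines heapq's pop results, so this is
-- exact for every input.
def pqInsert (v : Nat) : List Nat → List Nat
  | [] => [v]
  | h :: t => if h < v then v :: h :: t else h :: pqInsert v t

-- the two `if new_freq != 0: heappush(...)` blocks of A's loop body
def pushBack (n : Nat) (pq : List Nat) : List Nat :=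
  if n ≠ 0 then pqInsert n pq else pq

-- A's `while len(pq) > 1` loop together with the final `return -pq[0] if len(pq)==1 else 0`.
-- Each iteration pops two counts and re-inserts them decremented, so sum+length drops by 2:
-- fuel = sum+length bounds the iteration count and makes the recursion structural.
def pqPopLoopF : Nat → List Nat → Nat
  | _, [] => 0
  | _, [f] => f
  | 0, f1 :: _ :: _ => f1
  | fuel + 1, f1 :: f2 :: rest =>
      pqPopLoopF fuel (pushBack (f2 - 1) (pushBack (f1 - 1) rest))

def pqPopLoop (pq : List Nat) : Nat := pqPopLoopF (pq.sum + pq.length) pq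

def getMinimumFruits (fruits : List Int) : Int :=
  let freq := PySem.Dict.counter fruits
  let pq := freq.values.foldl (fun pq v => pqInsert v.toNat pq) []
  ((pqPopLoop pq : Int))

-- ===== PORT B =====
def getMinimumFruits_alt (fruits : List Int) : Int :=
  if fruits = [] then 0
  else
    let m := ((PySem.List.max? (PySem.Dict.counter fruits).values (fun v => v)).getD 0)
    let total : Int := fruits.length
    if 2 * m > total then 2 * m - total else PySem.Int.mod total 2

-- ===== PRECONDITION & SPEC =====
def Spec_getMinimumFruits (fruits : List Int) (out : Int) : Prop := out = getMinimumFruits_alt fruits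
instance (fruits : List Int) (out : Int) : Decidable (Spec_getMinimumFruits fruits out) := by unfold Spec_getMinimumFruits; infer_instance

-- ===== CLAIM (what is proved, stated in full; the proofs are below) =====
def Claim_equal_getMinimumFruits : Prop := ∀ (fruits : List Int), Dom_getMinimumFruits fruits → Spec_getMinimumFruits fruits (getMinimumFruits fruits)

-- ===== LEMMAS AND PROOFS =====

theorem pqInsert_sum (v : Nat) (pq : List Nat) : (pqInsert v pq).sum = v + pq.sum := by
  induction pq with
  | nil => simp [pqInsert]
  | cons h t ih =>
    simp only [pqInsert]
    split_ifs <;> simp [ih] <;> omega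

theorem pqInsert_length (v : Nat) (pq : List Nat) :
    (pqInsert v pq).length = pq.length + 1 := by
  induction pq with
  | nil => simp [pqInsert]
  | cons h t ih => simp [pqInsert]; split_ifs <;> simp [ih]

theorem pushBack_sum (n : Nat) (pq : List Nat) : (pushBack n pq).sum = n + pq.sum := by
  unfold pushBack; split_ifs with h
  · exact pqInsert_sum n pq
  · omega

-- the closed-form value of the pairing game on a multiset with maximum m and total s
def G (m s : Nat) : Nat := if s < 2 * m then 2 * m - s else s % 2

theorem mem_pqInsert {x v : Nat} {pq : List Nat} :
    x ∈ pqInsert v pq ↔ x = v ∨ x ∈ pq := by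
  induction pq with
  | nil => simp [pqInsert]
  | cons h t ih =>
    simp only [pqInsert]
    split_ifs <;> simp [ih] <;> tauto

theorem headD_pqInsert (v : Nat) (pq : List Nat) :
    (pqInsert v pq).headD 0 = max v (pq.headD 0) := by
  cases pq with
  | nil => simp [pqInsert]
  | cons h t =>
    simp only [pqInsert]
    split_ifs with hv
    · simp only [List.headD_cons]; omega
    · simp only [List.headD_cons]; omega

theorem pqInsert_desc (v : Nat) {pq : List Nat}
    (h : pq.Pairwise (fun a b => b ≤ a)) :
    (pqInsert v pq).Pairwise (fun a b => b ≤ a) := by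
  induction pq with
  | nil => simp [pqInsert]
  | cons h0 t ih =>
    rcases List.pairwise_cons.mp h with ⟨hall, ht⟩
    simp only [pqInsert]
    split_ifs with hv
    · exact List.pairwise_cons.mpr ⟨by
        intro b hb
        rcases List.mem_cons.mp hb with rfl | hb
        · omega
        · exact le_trans (hall b hb) (le_of_lt hv),
        List.pairwise_cons.mpr ⟨hall, ht⟩⟩
    · exact List.pairwise_cons.mpr ⟨by
        intro b hb
        rcases mem_pqInsert.mp hb with rfl | hb
        · omega
        · exact hall b hb,
        ih ht⟩

theorem pushBack_desc (n : Nat) {pq : List Nat}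
    (h : pq.Pairwise (fun a b => b ≤ a)) :
    (pushBack n pq).Pairwise (fun a b => b ≤ a) := by
  unfold pushBack; split_ifs with hn
  · exact pqInsert_desc n h
  · exact h

theorem pushBack_pos (n : Nat) {pq : List Nat} (h : ∀ x ∈ pq, 1 ≤ x) :
    ∀ x ∈ pushBack n pq, 1 ≤ x := by
  unfold pushBack; split_ifs with hn
  · intro x hx
    rcases mem_pqInsert.mp hx with rfl | hx
    · omega
    · exact h x hx
  · exact h

theorem headD_pushBack (n : Nat) (pq : List Nat) :
    (pushBack n pq).headD 0 = max n (pq.headD 0) := by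
  unfold pushBack; split_ifs with hn
  · exact headD_pqInsert n pq
  · have : n = 0 := by omega
    simp [this]

theorem headD_le_sum (pq : List Nat) : pq.headD 0 ≤ pq.sum := by
  cases pq with
  | nil => simp
  | cons h t => simp only [List.headD_cons, List.sum_cons]; omega

-- the heap loop computes the closed form (fuel version, by induction on the fuel)
theorem step_measure (f1 f2 : Nat) (rest : List Nat) (h1 : 1 ≤ f1) (h2 : 1 ≤ f2) :
    (pushBack (f2 - 1) (pushBack (f1 - 1) rest)).sum
      + (pushBack (f2 - 1) (pushBack (f1 - 1) rest)).length + 2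
    ≤ (f1 :: f2 :: rest).sum + (f1 :: f2 :: rest).length := by
  unfold pushBack
  split_ifs <;> simp [pqInsert_sum, pqInsert_length, List.sum_cons] <;> omega

theorem pqPopLoopF_eq_G (fuel : Nat) : ∀ (pq : List Nat),
    pq.sum + pq.length ≤ fuel →
    pq.Pairwise (fun a b => b ≤ a) → (∀ x ∈ pq, 1 ≤ x) →
    pqPopLoopF fuel pq = G (pq.headD 0) pq.sum := by
  induction fuel with
  | zero =>
    intro pq hle _ _
    cases pq with
    | nil => simp [pqPopLoopF, G]
    | cons a t => simp [List.length_cons] at hle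
  | succ n ih =>
    intro pq hle hd hp
    match pq with
    | [] => simp [pqPopLoopF, G]
    | [f] =>
      have hf := hp f (by simp)
      simp only [pqPopLoopF, G, List.headD_cons, List.sum_cons, List.sum_nil]
      split_ifs <;> omega
    | f1 :: f2 :: rest =>
      have hf1 : 1 ≤ f1 := hp f1 (by simp)
      have hf2 : 1 ≤ f2 := hp f2 (by simp)
      rcases List.pairwise_cons.mp hd with ⟨h1all, hd2⟩
      rcases List.pairwise_cons.mp hd2 with ⟨h2all, hdr⟩
      have h12 : f2 ≤ f1 := h1all f2 (by simp)
      have h23 : rest.headD 0 ≤ f2 := by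
        cases rest with
        | nil => simp
        | cons a t => exact h2all a (by simp)
      have h3sum : rest.headD 0 ≤ rest.sum := headD_le_sum rest
      have hrpos : ∀ x ∈ rest, 1 ≤ x := fun x hx => hp x (by simp [hx])
      have hdesc2 : (pushBack (f2 - 1) (pushBack (f1 - 1) rest)).Pairwise
          (fun a b => b ≤ a) := pushBack_desc _ (pushBack_desc _ hdr)
      have hpos2 : ∀ x ∈ pushBack (f2 - 1) (pushBack (f1 - 1) rest), 1 ≤ x :=
        pushBack_pos _ (pushBack_pos _ hrpos)
      have hmeas := step_measure f1 f2 rest hf1 hf2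
      have hle2 : (pushBack (f2 - 1) (pushBack (f1 - 1) rest)).sum
          + (pushBack (f2 - 1) (pushBack (f1 - 1) rest)).length ≤ n := by
        simp only [List.sum_cons, List.length_cons] at hle hmeas; omega
      have hsum : (pushBack (f2 - 1) (pushBack (f1 - 1) rest)).sum
          = (f2 - 1) + ((f1 - 1) + rest.sum) := by
        rw [pushBack_sum, pushBack_sum]
      have hhead : (pushBack (f2 - 1) (pushBack (f1 - 1) rest)).headD 0
          = max (f2 - 1) (max (f1 - 1) (rest.headD 0)) := by
        rw [headD_pushBack, headD_pushBack]
      rw [pqPopLoopF, ih _ hle2 hdesc2 hpos2, hsum, hhead]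
      simp only [List.sum_cons, List.headD_cons, G]
      split_ifs <;> omega

theorem pqPopLoop_eq_G (pq : List Nat)
    (hd : pq.Pairwise (fun a b => b ≤ a)) (hp : ∀ x ∈ pq, 1 ≤ x) :
    pqPopLoop pq = G (pq.headD 0) pq.sum :=
  pqPopLoopF_eq_G (pq.sum + pq.length) pq le_rfl hd hp

-- Counter facts: the list of counts is positive, sums to len(fruits), and its running
-- maximum is the maximum count.
theorem counter_values_eq (fruits : List Int) :
    (PySem.Dict.counter fruits).values
      = (PySem.Set.ofList fruits).map (fun k => (fruits.count k : Int)) := by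
  have h := PySem.Dict.items_counter (xs := fruits)
  have : (PySem.Dict.counter fruits).values
      = (PySem.Dict.counter fruits).items.map (·.2) := rfl
  rw [this, h, List.map_map]
  rfl

theorem counter_values_pos (fruits : List Int) :
    ∀ v ∈ (PySem.Dict.counter fruits).values, 1 ≤ v := by
  rw [counter_values_eq]
  intro v hv
  rcases List.mem_map.mp hv with ⟨k, hk, rfl⟩
  have : k ∈ fruits := (PySem.Set.mem_ofList fruits k).mp hk
  have := List.count_pos_iff.mpr this
  omega

theorem counter_values_toNat_sum (fruits : List Int) :
    ((PySem.Dict.counter fruits).values.map Int.toNat).sum = fruits.length := by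
  rw [counter_values_eq, List.map_map]
  have hmap : ((fun v => Int.toNat v) ∘ fun k => ((fruits.count k : Nat) : Int))
      = fun k => fruits.count k := by
    funext k; simp
  rw [hmap]
  have hperm : (PySem.Set.ofList fruits).Perm fruits.dedup := by
    rw [List.perm_ext_iff_of_nodup (PySem.Set.nodup_ofList fruits) fruits.nodup_dedup]
    intro a
    rw [PySem.Set.mem_ofList, List.mem_dedup]
  calc ((PySem.Set.ofList fruits).map (fun k => fruits.count k)).sum
      = (fruits.dedup.map (fun k => fruits.count k)).sum :=
        (hperm.map (fun k => fruits.count k)).sum_eq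
    _ = fruits.length := List.sum_map_count_dedup_eq_length fruits

-- the heap built by the push loop: sum and maximum of the inserted counts
theorem foldl_pqInsert_sum (vs : List Int) (acc : List Nat) :
    (vs.foldl (fun pq v => pqInsert v.toNat pq) acc).sum
      = acc.sum + (vs.map Int.toNat).sum := by
  induction vs generalizing acc with
  | nil => simp
  | cons v t ih => simp [List.foldl_cons, ih, pqInsert_sum]; omega

theorem foldl_pqInsert_headD (vs : List Int) (acc : List Nat) :
    (vs.foldl (fun pq v => pqInsert v.toNat pq) acc).headD 0
      = vs.foldl (fun m v => max m v.toNat) (acc.headD 0) := by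
  induction vs generalizing acc with
  | nil => simp
  | cons v t ih =>
    simp only [List.foldl_cons, ih, headD_pqInsert]
    rw [Nat.max_comm]

theorem foldl_pqInsert_desc (vs : List Int) (acc : List Nat)
    (h : acc.Pairwise (fun a b => b ≤ a)) :
    (vs.foldl (fun pq v => pqInsert v.toNat pq) acc).Pairwise (fun a b => b ≤ a) := by
  induction vs generalizing acc with
  | nil => exact h
  | cons v t ih => exact ih _ (pqInsert_desc _ h)

theorem foldl_pqInsert_pos (vs : List Int) (acc : List Nat)
    (hvs : ∀ v ∈ vs, 1 ≤ v) (hacc : ∀ x ∈ acc, 1 ≤ x) :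
    ∀ x ∈ vs.foldl (fun pq v => pqInsert v.toNat pq) acc, 1 ≤ x := by
  induction vs generalizing acc with
  | nil => exact hacc
  | cons v t ih =>
    refine ih _ (fun w hw => hvs w (by simp [hw])) ?_
    intro x hx
    rcases mem_pqInsert.mp hx with rfl | hx
    · have := hvs v (by simp); omega
    · exact hacc x hx

-- Int running max vs Nat running max of toNats
theorem foldl_max_toNat (vs : List Int) (a : Int) :
    (vs.foldl (fun m v => max m v) a).toNat
      = vs.foldl (fun m v => max m v.toNat) a.toNat := by
  induction vs generalizing a with
  | nil => rfl
  | cons v t ih =>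
    simp only [List.foldl_cons, ih]
    congr 1
    omega

-- ===== VERDICT (by name: the statement is the Claim_ definition above) =====
theorem getMinimumFruits_spec : Claim_equal_getMinimumFruits := by
  intro fruits _
  unfold Spec_getMinimumFruits getMinimumFruits getMinimumFruits_alt
  by_cases hnil : fruits = []
  · subst hnil
    rfl
  · simp only [hnil, if_false]
    set vs := (PySem.Dict.counter fruits).values with hvs
    have hvpos : ∀ v ∈ vs, 1 ≤ v := counter_values_pos fruits
    have hlen0 : fruits.length ≠ 0 := fun h => hnil (List.length_eq_zero_iff.mp h)
    have hvne : vs ≠ [] := by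
      intro h
      have hlen := counter_values_toNat_sum fruits
      rw [← hvs, h] at hlen
      simp only [List.map_nil, List.sum_nil] at hlen
      exact hlen0 hlen.symm
    obtain ⟨x, t, hx⟩ := List.exists_cons_of_ne_nil hvne
    have hdesc := foldl_pqInsert_desc vs [] (by simp)
    have hpos := foldl_pqInsert_pos vs [] hvpos (by simp)
    rw [pqPopLoop_eq_G _ hdesc hpos, foldl_pqInsert_sum, foldl_pqInsert_headD]
    have hsum : ([] : List Nat).sum + (vs.map Int.toNat).sum = fruits.length := by
      simpa using counter_values_toNat_sum fruits
    -- B's maximum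
    rw [hx]
    have hmax : PySem.List.max? (x :: t) (fun v => v) = some (t.foldl max x) :=
      PySem.List.max?_id_cons x t
    rw [hmax]
    have hm1 : (1 : Int) ≤ t.foldl max x := by
      have hmem : t.foldl max x ∈ x :: t := PySem.List.max?_mem hmax
      exact hvpos _ (hx ▸ hmem)
    have hMnat : (x :: t).foldl (fun m v => max m v.toNat) (([] : List Nat).headD 0)
        = (t.foldl max x).toNat := by
      simp only [List.headD_nil, List.foldl_cons, Nat.zero_max]
      exact (foldl_max_toNat t x).symm
    rw [hMnat]
    rw [hx] at hsum
    have hmod : PySem.Int.mod (fruits.length : Int) 2 = ((fruits.length % 2 : Nat) : Int) := by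
      exact_mod_cast PySem.Int.mod_natCast fruits.length 2
    rw [hmod]
    simp only [List.sum_nil, Nat.zero_add] at hsum
    have hMeq : (((t.foldl max x).toNat : Int)) = t.foldl max x := by omega
    unfold G
    simp only [Option.getD_some, List.sum_nil, Nat.zero_add]
    split_ifs with h1 h2 h2 <;> omega
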